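-- pv_equiv track=rewrite | github.com/nur-ag/emotion-classification | src/utils/tokens.py | count_tokens
-- ===== SOURCE A (Python) =====
-- import string
--
-- SEPARATOR_CHAR_SET = set(string.whitespace + string.punctuation)
--
-- def count_tokens(string):
--     previous_sep = False
--     separator_count = 0
--     for char in string:
--         if char in SEPARATOR_CHAR_SET:
--             if previous_sep:
--                 continue
--             previous_sep = True
--             separator_count += 1
--         else:
--             previous_sep = False
--     # Do not count trailing separator
--     if previous_sep:
--         separator_count -= 1
--     return separator_count + 1
-- ===== SOURCE B (Python) =====
-- import string as _string
--
-- _SEPS = set(_string.whitespace + _string.punctuation)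
--
--
-- def count_tokens(string):
--     # Count word starts (a non-separator preceded by a separator/start) instead
--     # of separator runs; the leading/trailing quirks collapse into one term.
--     word_starts = sum(1 for prev, cur in zip(" " + string, string)
--                       if prev in _SEPS and cur not in _SEPS)
--     return word_starts + (1 if not string or string[0] in _SEPS else 0)
-- ===== Notes on version B (the rewrite author's own statement) =====
-- stated objective: alternative
-- what changed: Replaces A's stateful separator-run scan (previous_sep flag, run count, trailing-run correction) with a stateless zip of the string against its one-shifted self counting word starts, plus a single leading-separator/empty adjustment.
import Mathlib
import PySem

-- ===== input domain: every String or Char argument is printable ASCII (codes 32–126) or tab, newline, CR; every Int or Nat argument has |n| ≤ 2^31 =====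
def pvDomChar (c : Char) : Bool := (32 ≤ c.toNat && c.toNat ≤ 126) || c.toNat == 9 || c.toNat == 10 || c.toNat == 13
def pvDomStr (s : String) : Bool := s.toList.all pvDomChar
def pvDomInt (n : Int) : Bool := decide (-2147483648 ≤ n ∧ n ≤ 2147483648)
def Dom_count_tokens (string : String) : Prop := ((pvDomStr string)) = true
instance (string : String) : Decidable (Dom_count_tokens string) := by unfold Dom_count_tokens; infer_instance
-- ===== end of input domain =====

-- B counts word starts via a zip with the shifted string instead of A's stateful
-- separator-run scan with a trailing-run correction (objective: alternative decomposition).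

-- SEPARATOR_CHAR_SET = set(string.whitespace + string.punctuation)
def sepChars : List Char := (" \t\n\r\u000b\u000c!\"#$%&'()*+,-./:;<=>?@[\\]^_`{|}~").toList

def isSep (c : Char) : Bool := sepChars.contains c

-- ===== PORT A =====
def count_tokens (string : String) : Int :=
  let st := string.toList.foldl
    (fun (st : Bool × Int) c =>
      if isSep c then
        if st.1 then st else (true, st.2 + 1)
      else (false, st.2))
    (false, 0)
  (if st.1 then st.2 - 1 else st.2) + 1

-- ===== PORT B =====
def count_tokens_alt (string : String) : Int :=
  let cs := string.toList
  let wordStarts : Int :=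
    ((' ' :: cs).zip cs).countP (fun p => isSep p.1 && !isSep p.2)
  wordStarts + (match cs with
                | [] => 1
                | c :: _ => if isSep c then 1 else 0)

-- ===== PRECONDITION & SPEC =====
def Spec_count_tokens (string : String) (out : Int) : Prop := out = count_tokens_alt string
instance (string : String) (out : Int) : Decidable (Spec_count_tokens string out) := by unfold Spec_count_tokens; infer_instance

-- ===== CLAIM (what is proved, stated in full; the proofs are below) =====
def Claim_equal_count_tokens : Prop := ∀ (string : String), Dom_count_tokens string → Spec_count_tokens string (count_tokens string)

-- ===== LEMMAS AND PROOFS =====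

-- word-start counter with an explicit previous-is-separator flag
def wcount (p : Bool) : List Char → Int
  | [] => 0
  | c :: cs => (if p && !isSep c then 1 else 0) + wcount (isSep c) cs

lemma countP_zip_eq_wcount (pc : Char) (cs : List Char) :
    (((pc :: cs).zip cs).countP (fun p => isSep p.1 && !isSep p.2) : Int)
      = wcount (isSep pc) cs := by
  induction cs generalizing pc with
  | nil => simp [wcount]
  | cons c rest ih =>
    simp only [List.zip_cons_cons, List.countP_cons, wcount, ← ih c]
    push_cast
    ring

lemma foldl_eq_wcount (cs : List Char) (p : Bool) (n : Int) :
    (let st := cs.foldl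
      (fun (st : Bool × Int) c =>
        if isSep c then
          if st.1 then st else (true, st.2 + 1)
        else (false, st.2))
      (p, n)
     if st.1 then st.2 - 1 else st.2)
    = n + wcount p cs + (if p then -1 else 0) := by
  induction cs generalizing p n with
  | nil => cases p <;> (simp [wcount]; try ring)
  | cons c rest ih =>
    by_cases hc : isSep c = true <;> cases p <;>
      simp [wcount, hc, List.foldl_cons, ih] <;> ring

lemma wcount_false_succ (cs : List Char) :
    wcount false cs + 1
      = wcount true cs + (match cs with
                          | [] => (1 : Int)
                          | c :: _ => if isSep c then 1 else 0) := by
  cases cs with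
  | nil => simp [wcount]
  | cons c rest => by_cases h : isSep c = true <;> (simp [wcount, h]; try ring)

-- ===== VERDICT (by name: the statement is the Claim_ definition above) =====
theorem count_tokens_spec : Claim_equal_count_tokens := by
  intro s _
  show count_tokens s = count_tokens_alt s
  have hA := foldl_eq_wcount s.toList false 0
  have hB := countP_zip_eq_wcount ' ' s.toList
  simp only [count_tokens, count_tokens_alt]
  rw [hA, hB]
  have : isSep ' ' = true := by decide
  rw [this]
  simpa using wcount_false_succ s.toList
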